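-- pv_equiv track=rewrite | github.com/Prajwal203-code/webscrapper | scraper_fast.py | ensure_minimum_words
-- ===== SOURCE A (Python) =====
-- def ensure_minimum_words(summary, min_words):
--     """Ensure summary meets minimum word count."""
--     words = summary.split()
--     if len(words) >= min_words:
--         return summary
--
--     # Add generic business phrases to reach minimum
--     additional_phrases = [
--         "The company focuses on delivering quality solutions and maintaining strong client relationships.",
--         "They provide professional services with a commitment to excellence and customer satisfaction.",
--         "The organization emphasizes innovation, reliability, and continuous improvement in all offerings.",
--         "They serve clients across various industries with tailored solutions and dedicated support.",
--         "The team consists of experienced professionals dedicated to achieving client success."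
--     ]
--
--     for phrase in additional_phrases:
--         if len(words) >= min_words:
--             break
--         summary = f"{summary} {phrase}"
--         words = summary.split()
--
--     return summary
-- ===== SOURCE B (Python) =====
-- ADDITIONAL_PHRASES = [
--     "The company focuses on delivering quality solutions and maintaining strong client relationships.",
--     "They provide professional services with a commitment to excellence and customer satisfaction.",
--     "The organization emphasizes innovation, reliability, and continuous improvement in all offerings.",
--     "They serve clients across various industries with tailored solutions and dedicated support.",
--     "The team consists of experienced professionals dedicated to achieving client success.",
-- ]
--
-- # cumulative word-count thresholds, precomputed once at module load
-- _CUM = []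
-- _t = 0
-- for _p in ADDITIONAL_PHRASES:
--     _t += len(_p.split())
--     _CUM.append(_t)
--
--
-- def ensure_minimum_words(summary, min_words):
--     """Ensure summary meets minimum word count."""
--     deficit = min_words - len(summary.split())
--     if deficit <= 0:
--         return summary
--     # rank the deficit among the precomputed thresholds: k phrases are needed
--     # where k-1 thresholds lie strictly below the deficit (capped at 5)
--     k = min(len(ADDITIONAL_PHRASES), sum(c < deficit for c in _CUM) + 1)
--     return ' '.join([summary] + ADDITIONAL_PHRASES[:k])
-- ===== Notes on version B (the rewrite author's own statement) =====
-- stated objective: alternative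
-- what changed: B replaces A's greedy append-and-resplit loop by a loop-free rank computation: cumulative phrase word counts are precomputed once at module level, k is obtained as a counting formula (number of thresholds below the deficit, plus one, capped at 5), and the result is built by a single ' '.join.
import Mathlib
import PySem

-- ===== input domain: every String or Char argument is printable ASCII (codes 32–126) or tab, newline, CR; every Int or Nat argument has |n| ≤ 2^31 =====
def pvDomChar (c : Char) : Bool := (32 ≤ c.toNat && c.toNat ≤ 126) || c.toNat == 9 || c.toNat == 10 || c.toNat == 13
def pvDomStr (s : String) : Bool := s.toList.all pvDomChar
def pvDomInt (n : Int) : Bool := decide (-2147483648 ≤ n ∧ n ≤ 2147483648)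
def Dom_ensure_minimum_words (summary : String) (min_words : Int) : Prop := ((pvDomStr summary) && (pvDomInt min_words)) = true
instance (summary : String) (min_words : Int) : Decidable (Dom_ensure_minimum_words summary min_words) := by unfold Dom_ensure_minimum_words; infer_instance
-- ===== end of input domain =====

-- B replaces A's greedy append-and-resplit loop by a loop-free rank lookup against
-- precomputed cumulative phrase word counts, plus a single join (objective: alternative).

-- ===== PORT A =====
def ensure_minimum_words (summary : String) (min_words : Int) : String :=
  let words := PySem.Str.split₀ summary
  if (words.length : Int) ≥ min_words then summary
  else
    let additional_phrases : List String := [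
      "The company focuses on delivering quality solutions and maintaining strong client relationships.",
      "They provide professional services with a commitment to excellence and customer satisfaction.",
      "The organization emphasizes innovation, reliability, and continuous improvement in all offerings.",
      "They serve clients across various industries with tailored solutions and dedicated support.",
      "The team consists of experienced professionals dedicated to achieving client success."]
    (additional_phrases.foldl
      (fun (st : String × List String) phrase =>
        if (st.2.length : Int) ≥ min_words then st
        else
          let s := st.1 ++ " " ++ phrase
          (s, PySem.Str.split₀ s))
      (summary, words)).1

-- ===== PORT B =====
def additionalPhrases : List String := [
  "The company focuses on delivering quality solutions and maintaining strong client relationships.",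
  "They provide professional services with a commitment to excellence and customer satisfaction.",
  "The organization emphasizes innovation, reliability, and continuous improvement in all offerings.",
  "They serve clients across various industries with tailored solutions and dedicated support.",
  "The team consists of experienced professionals dedicated to achieving client success."]

-- module-level precomputation of cumulative word-count thresholds (Source B's _CUM loop)
def cumCounts : List Int :=
  (additionalPhrases.foldl
    (fun (st : Int × List Int) p =>
      let t := st.1 + ((PySem.Str.split₀ p).length : Int)
      (t, st.2 ++ [t]))
    (0, [])).2

def ensure_minimum_words_alt (summary : String) (min_words : Int) : String :=
  let deficit : Int := min_words - ((PySem.Str.split₀ summary).length : Int)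
  if deficit ≤ 0 then summary
  else
    let k := min additionalPhrases.length ((cumCounts.countP (fun c => decide (c < deficit))) + 1)
    PySem.Str.join " " (summary :: additionalPhrases.take k)

-- ===== PRECONDITION & SPEC =====
def Spec_ensure_minimum_words (summary : String) (min_words : Int) (out : String) : Prop := out = ensure_minimum_words_alt summary min_words
instance (summary : String) (min_words : Int) (out : String) : Decidable (Spec_ensure_minimum_words summary min_words out) := by unfold Spec_ensure_minimum_words; infer_instance

-- ===== CLAIM =====
def Claim_equal_ensure_minimum_words : Prop := ∀ (summary : String) (min_words : Int), Dom_ensure_minimum_words summary min_words → Spec_ensure_minimum_words summary min_words (ensure_minimum_words summary min_words)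

-- ===== LEMMAS AND PROOFS =====

-- split₀.go with a pending accumulator: the accumulated words are prepended
theorem split0_go_acc (p : List Char) : ∀ (cur : List Char) (acc : List (List Char)),
    PySem.Chars.split₀.go p cur acc = acc.reverse ++ PySem.Chars.split₀.go p cur [] := by
  induction p with
  | nil =>
    intro cur acc
    simp only [PySem.Chars.split₀.go]
    split_ifs <;> simp
  | cons c rest ih =>
    intro cur acc
    simp only [PySem.Chars.split₀.go]
    split_ifs with h1 h2
    · exact ih [] acc
    · rw [ih [] (cur.reverse :: acc), ih [] [cur.reverse]]
      simp
    · exact ih (c :: cur) acc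

-- processing "xs ⧺ ' ' :: p" first finishes xs (the space flushes cur), then processes p
theorem split0_go_append_space (p : List Char) : ∀ (xs cur : List Char) (acc : List (List Char)),
    PySem.Chars.split₀.go (xs ++ ' ' :: p) cur acc
      = PySem.Chars.split₀.go p [] ((PySem.Chars.split₀.go xs cur acc).reverse) := by
  intro xs
  induction xs with
  | nil =>
    intro cur acc
    simp only [List.nil_append]
    conv_lhs => rw [PySem.Chars.split₀.go]
    conv_rhs => rw [PySem.Chars.split₀.go]
    rw [show PySem.Chars.isspace ' ' = true from rfl]
    split_ifs <;> simp_all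
  | cons c rest ih =>
    intro cur acc
    simp only [List.cons_append]
    conv_lhs => rw [PySem.Chars.split₀.go]
    conv_rhs => rw [PySem.Chars.split₀.go]
    split_ifs with h1 h2 <;> [exact ih [] acc; exact ih [] (cur.reverse :: acc); exact ih (c :: cur) acc]

theorem split0_append_space (xs p : List Char) :
    PySem.Chars.split₀ (xs ++ ' ' :: p) = PySem.Chars.split₀ xs ++ PySem.Chars.split₀ p := by
  unfold PySem.Chars.split₀
  rw [split0_go_append_space, split0_go_acc]
  simp

-- word-count additivity for the f-string concatenation of A
theorem len_split_append (s p : String) :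
    ((PySem.Str.split₀ (s ++ " " ++ p)).length : Int)
      = ((PySem.Str.split₀ s).length : Int) + ((PySem.Str.split₀ p).length : Int) := by
  simp only [PySem.Str.split₀, List.length_map]
  have h : (s ++ " " ++ p).toList = s.toList ++ ' ' :: p.toList := by simp
  rw [h, split0_append_space, List.length_append]
  push_cast
  ring

theorem join_one (a : String) : PySem.Str.join " " [a] = a := by
  apply String.ext
  simp [PySem.Str.join, PySem.Chars.join, List.intercalate]

theorem join_cons (a b : String) (l : List String) :
    PySem.Str.join " " (a :: b :: l) = PySem.Str.join " " ((a ++ " " ++ b) :: l) := by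
  apply String.ext
  cases l with
  | nil => simp [PySem.Str.join, PySem.Chars.join, List.intercalate]
  | cons c l' => simp [PySem.Str.join, PySem.Chars.join, List.intercalate, List.intersperse]

-- the word counts of the five literal phrases
theorem phc1 : ((PySem.Str.split₀ "The company focuses on delivering quality solutions and maintaining strong client relationships.").length : Int) = 12 := by decide
theorem phc2 : ((PySem.Str.split₀ "They provide professional services with a commitment to excellence and customer satisfaction.").length : Int) = 12 := by decide
theorem phc3 : ((PySem.Str.split₀ "The organization emphasizes innovation, reliability, and continuous improvement in all offerings.").length : Int) = 11 := by decide
theorem phc4 : ((PySem.Str.split₀ "They serve clients across various industries with tailored solutions and dedicated support.").length : Int) = 12 := by decide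

theorem cum_eq : cumCounts = [12, 24, 35, 47, 58] := by decide

-- ===== VERDICT =====
set_option maxHeartbeats 2000000 in
set_option maxRecDepth 8192 in
theorem ensure_minimum_words_spec : Claim_equal_ensure_minimum_words := by
  intro summary m _
  unfold Spec_ensure_minimum_words ensure_minimum_words ensure_minimum_words_alt additionalPhrases
  rw [cum_eq]
  simp only [List.foldl, List.countP, List.countP.go, Bool.cond_decide]
  split_ifs
  all_goals simp only [len_split_append, phc1, phc2, phc3, phc4] at *
  all_goals try omega
  all_goals simp [join_cons, join_one]
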